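-- pv_equiv track=rewrite | github.com/novayo/LeetCode | 1144_Decrease_Elements_To_Make_Array_Zigzag/try_1.py | movesToMakeZigzag
-- ===== SOURCE A (Python) =====
-- from typing import List
--
-- def movesToMakeZigzag(nums: List[int]) -> int:
--     ans = float('inf')
--
--     # 大小大, 小大小
--     for a, b in [0, 1], [1, 0]:
--         prev = nums[0]
--         move = 0
--         for i, num in enumerate(nums):
--             if i == 0:
--                 continue
--
--             if i % 2 == a and prev >= num:
--                 move += prev-num+1
--                 prev = num
--             elif i % 2 == b and prev <= num:
--                 move += num-prev+1
--                 prev = prev-1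
--             else:
--                 prev = num
--         ans = min(ans, move)
--
--     return ans
-- ===== SOURCE B (Python) =====
-- from typing import List
--
-- def movesToMakeZigzag(nums: List[int]) -> int:
--     if not nums:
--         return 0
--     n = len(nums)
--     res = [0, 0]  # res[p] = cost of making every index of parity p a local minimum
--     for i in range(n):
--         # a missing neighbor is modelled by nums[i] + 1, which never forces a move
--         left = nums[i - 1] if i > 0 else nums[i] + 1
--         right = nums[i + 1] if i + 1 < n else nums[i] + 1
--         res[i % 2] += max(0, nums[i] - min(left, right) + 1)
--     return min(res)
-- ===== Notes on version B (the rewrite author's own statement) =====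
-- stated objective: simpler
-- what changed: Replaces A's two greedy passes (each threading an adjusted prev across the array and taking the min of the two runs) by one pass that reads both neighbors of each element directly and accumulates the two parity costs in parallel.
import Mathlib
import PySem

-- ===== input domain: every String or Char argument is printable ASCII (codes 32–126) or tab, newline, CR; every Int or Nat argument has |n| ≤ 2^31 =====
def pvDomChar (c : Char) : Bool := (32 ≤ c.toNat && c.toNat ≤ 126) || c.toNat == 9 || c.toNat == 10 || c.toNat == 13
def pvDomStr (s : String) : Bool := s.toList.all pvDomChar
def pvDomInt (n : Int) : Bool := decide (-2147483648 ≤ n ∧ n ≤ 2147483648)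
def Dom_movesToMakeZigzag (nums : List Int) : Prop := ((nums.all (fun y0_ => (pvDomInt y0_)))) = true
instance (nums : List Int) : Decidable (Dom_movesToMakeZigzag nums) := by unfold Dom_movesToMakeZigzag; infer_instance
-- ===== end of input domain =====

-- B replaces A's two adjusted-prev greedy passes by one pass reading both neighbors and
-- keeping two parity accumulators (objective: simpler). A raises IndexError on []; B returns 0.


-- ===== PORT A =====
-- one pass of A's outer loop, for a given (a, b) ∈ {(0,1), (1,0)}; the fold state is (prev, move)
def passA (nums : List Int) (a b : Int) : Int :=
  ((PySem.List.enumerate nums 0).foldl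
    (fun (st : Int × Int) (p : Int × Int) =>
      if p.1 = 0 then st
      else if PySem.Int.mod p.1 2 = a ∧ st.1 ≥ p.2 then (p.2, st.2 + (st.1 - p.2 + 1))
      else if PySem.Int.mod p.1 2 = b ∧ st.1 ≤ p.2 then (st.1 - 1, st.2 + (p.2 - st.1 + 1))
      else (p.2, st.2))
    (PySem.List.pyGetD nums 0 0, 0)).2   -- prev = nums[0] (IndexError on []: outside Pre_)

def movesToMakeZigzag (nums : List Int) : Int :=
  -- ans = float('inf'); the unrolled outer loop computes ans = min(min(inf, move01), move10)
  min (passA nums 0 1) (passA nums 1 0)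

-- ===== PORT B =====
def movesToMakeZigzag_alt (nums : List Int) : Int :=
  if nums = [] then 0
  else
    let res := (PySem.List.pyRange 0 (nums.length : Int) 1).foldl
      (fun (res : Int × Int) (i : Int) =>
        let x := PySem.List.pyGetD nums i 0
        let left := if i > 0 then PySem.List.pyGetD nums (i - 1) 0 else x + 1
        let right := if i + 1 < (nums.length : Int) then PySem.List.pyGetD nums (i + 1) 0 else x + 1
        let c := max 0 (x - min left right + 1)
        if PySem.Int.mod i 2 = 0 then (res.1 + c, res.2) else (res.1, res.2 + c))
      (0, 0)
    min res.1 res.2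

-- ===== PRECONDITION & SPEC =====
-- A evaluates nums[0] before its loops, so it raises IndexError exactly on the empty list.
def Pre_movesToMakeZigzag (nums : List Int) : Prop := nums ≠ []
instance (nums : List Int) : Decidable (Pre_movesToMakeZigzag nums) := by unfold Pre_movesToMakeZigzag; infer_instance
def pvWitness_movesToMakeZigzag : List Int := [9, 6, 1, 6, 2]

def Spec_movesToMakeZigzag (nums : List Int) (out : Int) : Prop := out = movesToMakeZigzag_alt nums
instance (nums : List Int) (out : Int) : Decidable (Spec_movesToMakeZigzag nums out) := by unfold Spec_movesToMakeZigzag; infer_instance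

-- ===== CLAIM (what is proved, stated in full; the proofs are below) =====
def Claim_equal_movesToMakeZigzag : Prop := ∀ (nums : List Int), Dom_movesToMakeZigzag nums → Pre_movesToMakeZigzag nums → Spec_movesToMakeZigzag nums (movesToMakeZigzag nums)

-- ===== LEMMAS AND PROOFS =====

-- A's pass, cleaned up to a structural recursion: `low = true` means the next element sits at
-- an index of parity b (a "low" position); prev is the (possibly adjusted) previous value.
def run : Bool → Int → List Int → Int
  | _, _, [] => 0
  | true, prev, num :: rest =>
      if prev ≤ num then (num - prev + 1) + run false (prev - 1) rest
      else run false num rest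
  | false, prev, num :: rest =>
      (if prev ≥ num then prev - num + 1 else 0) + run true num rest

-- B's cost of the chain of low positions xs[0], xs[2], …, with `left` the element before xs[0]
def bsum (left : Int) : List Int → Int
  | [] => 0
  | [x] => max 0 (x - left + 1)
  | x :: y :: rest => max 0 (x - min left y + 1) + bsum y rest

-- the same chain started one later: low positions xs[1], xs[3], …
def bOther : List Int → Int
  | [] => 0
  | x :: rest => bsum x rest

-- chain in which additionally `left` itself is low, with only xs[0] as neighbor
def bsum2 (left : Int) : List Int → Int
  | [] => 0
  | x :: rest => max 0 (left - x + 1) + bsum x rest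

theorem run_true_eq (xs : List Int) (prev : Int) : run true prev xs = bsum prev xs := by
  have H : ∀ (n : Nat) (xs : List Int), xs.length ≤ n → ∀ prev, run true prev xs = bsum prev xs := by
    intro n
    induction n with
    | zero =>
      intro xs h prev
      have hx : xs = [] := List.eq_nil_of_length_eq_zero (Nat.le_zero.mp h)
      subst hx; simp [run, bsum]
    | succ n ih =>
      intro xs h prev
      match xs with
      | [] => simp [run, bsum]
      | [x] => simp only [run, bsum]; split_ifs <;> omega
      | x :: y :: rest =>
        have hr : rest.length ≤ n := by simp at h; omega
        simp only [run, bsum]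
        rw [ih rest hr y]
        split_ifs <;> omega
  exact H xs.length xs le_rfl prev

theorem run_false_eq (xs : List Int) (prev : Int) : run false prev xs = bsum2 prev xs := by
  cases xs with
  | nil => simp [run, bsum2]
  | cons x rest =>
    simp only [run, bsum2]
    rw [run_true_eq]
    split_ifs <;> omega

-- bridge from A's enumerate-fold to `run`
theorem bridgeA (a b : Int) (hab : (a = 0 ∧ b = 1) ∨ (a = 1 ∧ b = 0))
    (t : List Int) : ∀ (k : Int) (st : Int × Int), 1 ≤ k →
    ((PySem.List.enumerate t k).foldl
      (fun (st : Int × Int) (p : Int × Int) =>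
        if p.1 = 0 then st
        else if PySem.Int.mod p.1 2 = a ∧ st.1 ≥ p.2 then (p.2, st.2 + (st.1 - p.2 + 1))
        else if PySem.Int.mod p.1 2 = b ∧ st.1 ≤ p.2 then (st.1 - 1, st.2 + (p.2 - st.1 + 1))
        else (p.2, st.2)) st).2
    = st.2 + run (decide (k % 2 = b)) st.1 t := by
  induction t with
  | nil => intro k st hk; simp [PySem.List.enumerate_nil, run]
  | cons num rest ih =>
    intro k st hk
    rw [PySem.List.enumerate_cons, List.foldl_cons, ih (k + 1) _ (by omega)]
    have hk0 : ¬ (k = 0) := by omega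
    have hmod : ∀ x : Int, PySem.Int.mod x 2 = x % 2 :=
      fun x => PySem.Int.mod_eq_emod_of_pos (by norm_num)
    have hpar : k % 2 = 0 ∨ k % 2 = 1 := by omega
    rcases hab with ⟨ha, hb⟩ | ⟨ha, hb⟩ <;> subst ha <;> subst hb <;>
      rcases hpar with hpar | hpar <;>
      [ (have hps : (k + 1) % 2 = 1 := by omega);
        (have hps : (k + 1) % 2 = 0 := by omega);
        (have hps : (k + 1) % 2 = 1 := by omega);
        (have hps : (k + 1) % 2 = 0 := by omega) ] <;>
      · by_cases hge : st.1 ≥ num <;> by_cases hle : st.1 ≤ num <;>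
          (simp [hk0, hmod, hpar, hps, hge, hle, run] <;> omega)

-- the first enumerate element (index 0) is skipped by A's `continue`
theorem stepA_skip (a b h : Int) (t : List Int) (st : Int × Int) :
    (PySem.List.enumerate (h :: t) 0).foldl
      (fun (st : Int × Int) (p : Int × Int) =>
        if p.1 = 0 then st
        else if PySem.Int.mod p.1 2 = a ∧ st.1 ≥ p.2 then (p.2, st.2 + (st.1 - p.2 + 1))
        else if PySem.Int.mod p.1 2 = b ∧ st.1 ≤ p.2 then (st.1 - 1, st.2 + (p.2 - st.1 + 1))
        else (p.2, st.2)) st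
    = (PySem.List.enumerate t 1).foldl
      (fun (st : Int × Int) (p : Int × Int) =>
        if p.1 = 0 then st
        else if PySem.Int.mod p.1 2 = a ∧ st.1 ≥ p.2 then (p.2, st.2 + (st.1 - p.2 + 1))
        else if PySem.Int.mod p.1 2 = b ∧ st.1 ≤ p.2 then (st.1 - 1, st.2 + (p.2 - st.1 + 1))
        else (p.2, st.2)) st := by
  rw [PySem.List.enumerate_cons, List.foldl_cons]
  norm_num

theorem passA01 (h : Int) (t : List Int) : passA (h :: t) 0 1 = run true h t := by
  unfold passA
  rw [PySem.List.pyGetD_zero_cons, stepA_skip 0 1 h t (h, 0),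
    bridgeA 0 1 (Or.inl ⟨rfl, rfl⟩) t 1 (h, 0) le_rfl]
  norm_num

theorem passA10 (h : Int) (t : List Int) : passA (h :: t) 1 0 = run false h t := by
  unfold passA
  rw [PySem.List.pyGetD_zero_cons, stepA_skip 1 0 h t (h, 0),
    bridgeA 1 0 (Or.inr ⟨rfl, rfl⟩) t 1 (h, 0) le_rfl]
  norm_num

-- bridge from B's range-fold to bsum / bOther (index k as an Int, 1 ≤ k)
theorem bridgeB (l : List Int) : ∀ (m : Nat) (xs : List Int), xs.length ≤ m →
    ∀ (k : Int) (left : Int) (res : Int × Int), 1 ≤ k → l.drop (k.toNat - 1) = left :: xs →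
    ((PySem.List.pyRange k (l.length : Int) 1).foldl
      (fun (res : Int × Int) (i : Int) =>
        if PySem.Int.mod i 2 = 0 then
          (res.1 + max 0 (PySem.List.pyGetD l i 0 -
              min (if i > 0 then PySem.List.pyGetD l (i - 1) 0 else PySem.List.pyGetD l i 0 + 1)
                  (if i + 1 < (l.length : Int) then PySem.List.pyGetD l (i + 1) 0
                   else PySem.List.pyGetD l i 0 + 1) + 1), res.2)
        else
          (res.1, res.2 + max 0 (PySem.List.pyGetD l i 0 -
              min (if i > 0 then PySem.List.pyGetD l (i - 1) 0 else PySem.List.pyGetD l i 0 + 1)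
                  (if i + 1 < (l.length : Int) then PySem.List.pyGetD l (i + 1) 0
                   else PySem.List.pyGetD l i 0 + 1) + 1))) res)
    = (res.1 + (if k % 2 = 0 then bsum left xs else bOther xs),
       res.2 + (if k % 2 = 1 then bsum left xs else bOther xs)) := by
  intro m
  induction m with
  | zero =>
    intro xs hlen k left res hk hdrop
    have hx : xs = [] := List.eq_nil_of_length_eq_zero (Nat.le_zero.mp hlen)
    subst hx
    have hdl := List.length_drop (l := l) (i := k.toNat - 1)
    rw [hdrop] at hdl
    have hll : (l.length : Int) ≤ k := by simp at hdl; omega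
    rw [PySem.List.pyRange_one_eq_nil hll]
    simp [bsum, bOther]
  | succ m ih =>
    intro xs hlen k left res hk hdrop
    have hmod : ∀ x : Int, PySem.Int.mod x 2 = x % 2 :=
      fun x => PySem.Int.mod_eq_emod_of_pos (by norm_num)
    have hget : ∀ (j : Nat) (v : Int), (left :: xs)[j]? = some v →
        ∀ (i : Int), 0 ≤ i → i.toNat = k.toNat - 1 + j → PySem.List.pyGetD l i 0 = v := by
      intro j v hv i hi hij
      have h1 : (l.drop (k.toNat - 1))[j]? = some v := by rw [hdrop]; exact hv
      rw [List.getElem?_drop] at h1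
      rw [show i = ((i.toNat : Nat) : Int) by omega, PySem.List.pyGetD_natCast,
        List.getD_eq_getElem?_getD, hij, h1]
      rfl
    have hdl := List.length_drop (l := l) (i := k.toNat - 1)
    rw [hdrop] at hdl
    simp only [List.length_cons] at hdl
    match xs, hlen, hdrop, hdl, hget with
    | [], hlen, hdrop, hdl, hget =>
      have hll : (l.length : Int) ≤ k := by simp at hdl; omega
      rw [PySem.List.pyRange_one_eq_nil hll]
      simp [bsum, bOther]
    | [x], hlen, hdrop, hdl, hget =>
      have hll : (l.length : Int) = k + 1 := by simp at hdl; omega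
      have hx : PySem.List.pyGetD l k 0 = x := hget 1 x (by simp) k (by omega) (by omega)
      have hleft : PySem.List.pyGetD l (k - 1) 0 = left :=
        hget 0 left (by simp) (k - 1) (by omega) (by omega)
      rw [hll, PySem.List.pyRange_one_singleton, List.foldl_cons, List.foldl_nil]
      have hkpos : (0 : Int) < k := by omega
      have hnlt : ¬ (k + 1 < k + 1) := by omega
      have hpar : k % 2 = 0 ∨ k % 2 = 1 := by omega
      rcases hpar with hpar | hpar <;>
        · simp [hmod, hx, hleft, hkpos, hnlt, hpar, bsum, bOther, Prod.mk.injEq]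
          first
          | (split_ifs <;> omega)
          | omega
    | x :: y :: rest, hlen, hdrop, hdl, hget =>
      have hll : (l.length : Int) = k + 2 + (rest.length : Int) := by simp at hdl; omega
      have hx : PySem.List.pyGetD l k 0 = x := hget 1 x (by simp) k (by omega) (by omega)
      have hleft : PySem.List.pyGetD l (k - 1) 0 = left :=
        hget 0 left (by simp) (k - 1) (by omega) (by omega)
      have hy : PySem.List.pyGetD l (k + 1) 0 = y := hget 2 y (by simp) (k + 1) (by omega) (by omega)
      have hdrop' : l.drop ((k + 1).toNat - 1) = x :: y :: rest := by
        have h1 := congrArg List.tail hdrop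
        rw [List.tail_drop] at h1
        rw [show (k + 1).toNat - 1 = k.toNat - 1 + 1 by omega]
        exact h1
      have hklt : k < (l.length : Int) := by omega
      rw [PySem.List.pyRange_one_cons hklt, List.foldl_cons,
        ih (y :: rest) (by simp at hlen ⊢; omega) (k + 1) x _ (by omega) hdrop']
      have hkpos : (0 : Int) < k := by omega
      have hlt : k + 1 < (l.length : Int) := by omega
      have hpar : k % 2 = 0 ∨ k % 2 = 1 := by omega
      rcases hpar with hpar | hpar <;>
        · simp [hmod, hx, hleft, hy, hkpos, hlt, hpar, bsum, bOther, Prod.mk.injEq,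
            show (k + 1) % 2 = 1 - k % 2 by omega]
          first
          | (split_ifs <;> omega)
          | omega

theorem alt_eq (h : Int) (t : List Int) :
    movesToMakeZigzag_alt (h :: t) = min (bsum2 h t) (bsum h t) := by
  unfold movesToMakeZigzag_alt
  rw [if_neg (List.cons_ne_nil h t)]
  -- zeta-reduce the port's lets (definitional) into the let-free shape of bridgeB
  show (fun res : Int × Int => min res.1 res.2)
      (((PySem.List.pyRange 0 ((h :: t).length : Int) 1).foldl
        (fun (res : Int × Int) (i : Int) =>
          if PySem.Int.mod i 2 = 0 then
            (res.1 + max 0 (PySem.List.pyGetD (h :: t) i 0 -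
                min (if i > 0 then PySem.List.pyGetD (h :: t) (i - 1) 0 else PySem.List.pyGetD (h :: t) i 0 + 1)
                    (if i + 1 < ((h :: t).length : Int) then PySem.List.pyGetD (h :: t) (i + 1) 0
                     else PySem.List.pyGetD (h :: t) i 0 + 1) + 1), res.2)
          else
            (res.1, res.2 + max 0 (PySem.List.pyGetD (h :: t) i 0 -
                min (if i > 0 then PySem.List.pyGetD (h :: t) (i - 1) 0 else PySem.List.pyGetD (h :: t) i 0 + 1)
                    (if i + 1 < ((h :: t).length : Int) then PySem.List.pyGetD (h :: t) (i + 1) 0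
                     else PySem.List.pyGetD (h :: t) i 0 + 1) + 1))) (0, 0)))
      = min (bsum2 h t) (bsum h t)
  have hmod : ∀ x : Int, PySem.Int.mod x 2 = x % 2 :=
    fun x => PySem.Int.mod_eq_emod_of_pos (by norm_num)
  have h0 : (0 : Int) < ((h :: t).length : Int) := by
    simp
  rw [PySem.List.pyRange_one_cons h0, List.foldl_cons]
  have hdrop : (h :: t).drop ((0 + 1 : Int).toNat - 1) = h :: t := rfl
  rw [bridgeB (h :: t) t.length t le_rfl (0 + 1) h _ (by norm_num) hdrop]
  cases t with
  | nil =>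
    norm_num [hmod, PySem.List.pyGetD_zero_cons, bsum, bsum2, bOther]
  | cons t0 t' =>
    have ht0 : PySem.List.pyGetD (h :: t0 :: t') ((0 : Int) + 1) 0 = t0 := by
      rw [show ((0 : Int) + 1) = ((1 : Nat) : Int) by norm_num, PySem.List.pyGetD_natCast]
      rfl
    have h1lt : (0 : Int) + 1 < ((h :: t0 :: t').length : Int) := by
      simp
    simp only [hmod, PySem.List.pyGetD_zero_cons, ht0, h1lt, if_pos,
      show ¬((0 : Int) > 0) by omega, if_false]
    norm_num [bsum2, bOther]
    have hc : max 0 (h - min (h + 1) t0 + 1) = max 0 (h - t0 + 1) := by omega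
    omega

-- ===== VERDICT (by name: the statement is the Claim_ definition above) =====
theorem movesToMakeZigzag_spec : Claim_equal_movesToMakeZigzag := by
  intro nums _ hpre
  unfold Spec_movesToMakeZigzag
  match nums with
  | [] => exact absurd rfl hpre
  | h :: t =>
    rw [alt_eq, movesToMakeZigzag, passA01, passA10, run_true_eq, run_false_eq]
    omega
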